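-- pv_equiv track=rewrite | github.com/scottdharris11/advent-of-code-2019 | day24.py | biodiversity
-- ===== SOURCE A (Python) =====
-- def biodiversity(bugs: set[tuple[int,int]]) -> int:
--     """calcluate the biodiversity of the bug state"""
--     rating = 0
--     for y in range(5):
--         for x in range(5):
--             if (x,y) in bugs:
--                 p = (y * 5) + x
--                 rating += pow(2, p)
--     return rating
-- ===== SOURCE B (Python) =====
-- def biodiversity(bugs):
--     """calcluate the biodiversity of the bug state"""
--     return sum(2 ** (y * 5 + x) for (x, y) in bugs if 0 <= x < 5 and 0 <= y < 5)
-- ===== Notes on version B (the rewrite author's own statement) =====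
-- stated objective: simpler
-- what changed: Replaces the nested 5x5 grid scan with a membership test by a single sum over the members of the bug set, mapping each in-grid coordinate to its power of two.
import Mathlib
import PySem

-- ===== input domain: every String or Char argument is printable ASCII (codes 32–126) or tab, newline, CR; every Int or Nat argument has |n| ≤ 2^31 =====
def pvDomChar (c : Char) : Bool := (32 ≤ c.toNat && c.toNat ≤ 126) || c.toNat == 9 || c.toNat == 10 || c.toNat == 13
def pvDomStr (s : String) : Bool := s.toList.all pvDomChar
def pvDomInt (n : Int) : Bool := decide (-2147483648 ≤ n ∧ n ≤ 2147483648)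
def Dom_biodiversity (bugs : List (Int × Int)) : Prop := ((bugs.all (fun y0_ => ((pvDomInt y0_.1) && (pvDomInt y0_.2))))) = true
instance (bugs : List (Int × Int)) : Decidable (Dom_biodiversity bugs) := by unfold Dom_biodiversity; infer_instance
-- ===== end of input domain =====

-- B iterates over the members of the bug set instead of scanning the 5x5 grid (objective: simpler).

-- ===== PORT A =====
-- pow(2, p) with p = y*5+x, 0 ≤ p always on the loop's range, ported as 2 ^ p.toNat
def biodiversity (bugs : List (Int × Int)) : Int :=
  (PySem.List.pyRange 0 5 1).foldl (fun rating y =>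
    (PySem.List.pyRange 0 5 1).foldl (fun rating x =>
      if (x, y) ∈ bugs then rating + 2 ^ ((y * 5 + x).toNat) else rating) rating) 0

-- ===== PORT B =====
def biodiversity_alt (bugs : List (Int × Int)) : Int :=
  ((bugs.filter (fun c => 0 ≤ c.1 ∧ c.1 < 5 ∧ 0 ≤ c.2 ∧ c.2 < 5)).map
    (fun c => (2 : Int) ^ ((c.2 * 5 + c.1).toNat))).sum

-- ===== PRECONDITION & SPEC =====
-- bugs is a Python set; its List encoding holds distinct elements (the type convention),
-- so Pre_ states exactly that — A counts each grid cell once, never per occurrence.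
def Pre_biodiversity (bugs : List (Int × Int)) : Prop := bugs.Nodup
instance (bugs : List (Int × Int)) : Decidable (Pre_biodiversity bugs) := by unfold Pre_biodiversity; infer_instance
def pvWitness_biodiversity : (List (Int × Int)) := [(0, 0), (4, 2), (-1, 3), (2, 7)]
def Spec_biodiversity (bugs : List (Int × Int)) (out : Int) : Prop := out = biodiversity_alt bugs
instance (bugs : List (Int × Int)) (out : Int) : Decidable (Spec_biodiversity bugs out) := by unfold Spec_biodiversity; infer_instance

-- ===== CLAIM (what is proved, stated in full; the proofs are below) =====
def Claim_equal_biodiversity : Prop := ∀ (bugs : List (Int × Int)), Dom_biodiversity bugs → Pre_biodiversity bugs → Spec_biodiversity bugs (biodiversity bugs)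

-- ===== LEMMAS AND PROOFS =====

-- the 25 grid cells, in A's traversal order (x fast, y slow)
def pvCells : List (Int × Int) :=
  (List.range 5).flatMap (fun y => (List.range 5).map (fun x => ((x : Int), (y : Int))))

theorem pvIteAdd (c : Prop) [Decidable c] (t v : Int) :
    (if c then t + v else t) = t + (if c then v else 0) := by
  split <;> simp

theorem sum_map_filter {α : Type} (l : List α) (p : α → Prop) [DecidablePred p]
    (f : α → Int) :
    ((l.filter (fun x => p x)).map f).sum
      = (l.map (fun x => if p x then f x else 0)).sum := by
  induction l with
  | nil => simp
  | cons x t ih => by_cases h : p x <;> simp [h, ih]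

theorem mem_pvCells (c : Int × Int) :
    c ∈ pvCells ↔ (0 ≤ c.1 ∧ c.1 < 5 ∧ 0 ≤ c.2 ∧ c.2 < 5) := by
  obtain ⟨x, y⟩ := c
  simp [pvCells, List.mem_flatMap, List.mem_map, List.mem_range, Prod.ext_iff]
  constructor
  · rintro ⟨a, ha, b, hb, h1, h2⟩
    omega
  · rintro ⟨h1, h2, h3, h4⟩
    exact ⟨y.toNat, by omega, x.toNat, by omega, by omega, by omega⟩

theorem biodiversity_eq_cells (bugs : List (Int × Int)) :
    biodiversity bugs
      = (pvCells.map (fun c => if c ∈ bugs then (2 : Int) ^ ((c.2 * 5 + c.1).toNat) else 0)).sum := by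
  have hr : PySem.List.pyRange 0 5 1 = [0, 1, 2, 3, 4] := by decide
  have hcl : pvCells =
    [(0,0),(1,0),(2,0),(3,0),(4,0),(0,1),(1,1),(2,1),(3,1),(4,1),
     (0,2),(1,2),(2,2),(3,2),(4,2),(0,3),(1,3),(2,3),(3,3),(4,3),
     (0,4),(1,4),(2,4),(3,4),(4,4)] := by decide
  unfold biodiversity
  simp only [hr, List.foldl_cons, List.foldl_nil, pvIteAdd, hcl,
    List.map_cons, List.map_nil, List.sum_cons, List.sum_nil]
  norm_num
  ring

theorem biodiversity_spec : Claim_equal_biodiversity := by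
  intro bugs _ hnd
  unfold Spec_biodiversity biodiversity_alt
  rw [biodiversity_eq_cells, sum_map_filter]
  have hc : pvCells.Nodup := by decide
  calc (pvCells.map (fun c => if c ∈ bugs then (2 : Int) ^ ((c.2 * 5 + c.1).toNat) else 0)).sum
      = ∑ x ∈ pvCells.toFinset,
          (if x ∈ bugs.toFinset then (2 : Int) ^ ((x.2 * 5 + x.1).toNat) else 0) := by
        rw [← List.sum_toFinset _ hc]
        exact Finset.sum_congr rfl (fun x _ => by simp)
    _ = ∑ x ∈ pvCells.toFinset ∩ bugs.toFinset, (2 : Int) ^ ((x.2 * 5 + x.1).toNat) :=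
        Finset.sum_ite_mem _ _ _
    _ = ∑ x ∈ bugs.toFinset ∩ pvCells.toFinset, (2 : Int) ^ ((x.2 * 5 + x.1).toNat) := by
        rw [Finset.inter_comm]
    _ = ∑ x ∈ bugs.toFinset,
          (if x ∈ pvCells.toFinset then (2 : Int) ^ ((x.2 * 5 + x.1).toNat) else 0) :=
        (Finset.sum_ite_mem _ _ _).symm
    _ = (bugs.map (fun x => if 0 ≤ x.1 ∧ x.1 < 5 ∧ 0 ≤ x.2 ∧ x.2 < 5 then
          (2 : Int) ^ ((x.2 * 5 + x.1).toNat) else 0)).sum := by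
        rw [← List.sum_toFinset _ hnd]
        exact Finset.sum_congr rfl (fun x _ => by simp [mem_pvCells])
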